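-- pv_equiv track=rewrite | github.com/MegaGiciorPortas/WDI-Zadania | 05-rekurencja/5.184.py | operation_C
-- ===== SOURCE A (Python) =====
-- def operation_C(n):
--     if n == 0:
--         return 0
--     licznik = 1
--     while licznik < n:
--         licznik *= 10
--     wynik = 0
--     for _ in range(3):
--         cyfra = licznik // n
--         wynik = wynik * 10 + cyfra
--         licznik = (licznik % n) * 10
--     return wynik
-- ===== SOURCE B (Python) =====
-- def operation_C(n):
--     # Simpler: keep the zero guard and the smallest-power-of-10 loop, but replace the
--     # three-step long-division digit loop with the closed form (licznik * 100) // n.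
--     if n == 0:
--         return 0
--     licznik = 1
--     while licznik < n:
--         licznik *= 10
--     return (licznik * 100) // n
-- ===== Notes on version B (the rewrite author's own statement) =====
-- stated objective: simpler
-- what changed: The three-iteration long-division loop that accumulates digits one at a time is replaced by the single closed-form floor division (licznik*100)//n, justified by the long-division identity; the zero guard and power-of-10 loop are kept.
import Mathlib
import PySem

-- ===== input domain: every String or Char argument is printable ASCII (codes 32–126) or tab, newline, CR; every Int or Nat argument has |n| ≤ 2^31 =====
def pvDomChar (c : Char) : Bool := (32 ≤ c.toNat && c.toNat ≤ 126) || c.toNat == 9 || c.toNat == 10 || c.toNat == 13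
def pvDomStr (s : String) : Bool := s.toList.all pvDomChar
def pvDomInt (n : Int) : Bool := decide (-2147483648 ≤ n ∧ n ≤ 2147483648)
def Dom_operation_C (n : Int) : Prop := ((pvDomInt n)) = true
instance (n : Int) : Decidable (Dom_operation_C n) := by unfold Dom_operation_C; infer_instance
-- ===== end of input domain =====

-- B replaces A's three-step digit-extraction loop by the single closed form (licznik*100)//n (simpler).

-- shared helper: both Pythons contain the identical `while licznik < n: licznik *= 10` loop
def pyPow10From (n l : Int) (h : 0 < l) : Int :=
  if l < n then pyPow10From n (l * 10) (by positivity) else l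
termination_by (n - l).toNat
decreasing_by
  have h9 : l * 10 = l + 9 * l := by ring
  omega


-- ===== PORT A =====
def operation_C (n : Int) : Int :=
  if n == 0 then 0
  else
    let licznik := pyPow10From n 1 (by norm_num)
    let st := (PySem.List.pyRange 0 3 1).foldl
      (fun (s : Int × Int) _ =>
        let cyfra := PySem.Int.floordiv s.2 n
        (s.1 * 10 + cyfra, PySem.Int.mod s.2 n * 10)) (0, licznik)
    st.1

-- ===== PORT B =====
def operation_C_alt (n : Int) : Int :=
  if n == 0 then 0
  else
    let licznik := pyPow10From n 1 (by norm_num)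
    PySem.Int.floordiv (licznik * 100) n

-- ===== PRECONDITION & SPEC =====
def Spec_operation_C (n : Int) (out : Int) : Prop := out = operation_C_alt n
instance (n : Int) (out : Int) : Decidable (Spec_operation_C n out) := by unfold Spec_operation_C; infer_instance

-- ===== CLAIM (what is proved, stated in full; the proofs are below) =====
def Claim_equal_operation_C : Prop := ∀ (n : Int), Dom_operation_C n → Spec_operation_C n (operation_C n)

-- ===== LEMMAS AND PROOFS =====

-- one long-division step: peel one factor of 10 off the dividend
theorem fdiv_step (a n : Int) (hn : n ≠ 0) :
    (a * 10).fdiv n = a.fdiv n * 10 + (a.fmod n * 10).fdiv n := by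
  conv_lhs => rw [show a * 10 = a.fmod n * 10 + (a.fdiv n * 10) * n by
    linear_combination -10 * Int.mul_fdiv_add_fmod a n]
  rw [Int.add_mul_fdiv_right _ _ hn]; ring

theorem fmod_step (a n : Int) :
    (a * 10).fmod n = (a.fmod n * 10).fmod n := by
  conv_lhs => rw [show a * 10 = a.fmod n * 10 + (a.fdiv n * 10) * n by
    linear_combination -10 * Int.mul_fdiv_add_fmod a n]
  rw [Int.add_mul_fmod_self_right]

-- three long-division steps equal one division by n of a*100
theorem longdiv3 (a n : Int) (hn : n ≠ 0) :
    ((0 * 10 + a.fdiv n) * 10 + (a.fmod n * 10).fdiv n) * 10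
      + ((a.fmod n * 10).fmod n * 10).fdiv n = (a * 100).fdiv n := by
  have h1 : (a * 100) = (a * 10) * 10 := by ring
  rw [h1, fdiv_step (a * 10) n hn, fdiv_step a n hn, fmod_step a n]
  ring

-- ===== VERDICT (by name: the statement is the Claim_ definition above) =====
theorem operation_C_spec : Claim_equal_operation_C := by
  intro n _
  unfold Spec_operation_C operation_C operation_C_alt
  by_cases h0 : n = 0
  · simp [h0]
  · have hb : (n == 0) = false := by simp [h0]
    simp only [hb, Bool.false_eq_true]
    have hr : PySem.List.pyRange 0 3 1 = [0, 1, 2] := by decide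
    simp only [hr, List.foldl]
    exact longdiv3 (pyPow10From n 1 (by norm_num)) n h0
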